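-- pv_equiv track=rewrite | github.com/sakshamk6999/codingPractice | codeforces/practice/c.NumberOfGoodSubstrings.py | numberOfGoodStrings
-- ===== SOURCE A (Python) =====
-- def numberOfGoodStrings(s, n):
--     number = 0
--     value = 0
--     for i in range(n):
--         for j in range(i, n):
--             if i == j:
--                 value = s[j]
--             else:
--                 value = value * 2 + s[j]
--
--             if value == j - i + 1:
--                 number += 1
--         value = 0
--     return number
-- ===== SOURCE B (Python) =====
-- def numberOfGoodStrings(s, n):
--     # Precompute prefix binary values: pref[k] = value of s[0:k].
--     pref = [0]
--     for d in s[:n]: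
--         pref.append(pref[-1] * 2 + d)
--     # Substring s[i:i+L] has value pref[i+L] - (pref[i] << L); count, grouped by length.
--     total = 0
--     for L in range(1, n + 1):
--         for i in range(n - L + 1):
--             if pref[i + L] - (pref[i] << L) == L:
--                 total += 1
--     return total
-- ===== Notes on version B (the rewrite author's own statement) =====
-- stated objective: alternative
-- what changed: A enumerates substrings from each start index, carrying a running value that is doubled step by step; B first precomputes a prefix-value table in a separate pass and then counts, grouped by substring length, with the pure closed-form check pref[i+L] - (pref[i] << L) == L, so no accumulator is carried through the enumeration.
import Mathlib
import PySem

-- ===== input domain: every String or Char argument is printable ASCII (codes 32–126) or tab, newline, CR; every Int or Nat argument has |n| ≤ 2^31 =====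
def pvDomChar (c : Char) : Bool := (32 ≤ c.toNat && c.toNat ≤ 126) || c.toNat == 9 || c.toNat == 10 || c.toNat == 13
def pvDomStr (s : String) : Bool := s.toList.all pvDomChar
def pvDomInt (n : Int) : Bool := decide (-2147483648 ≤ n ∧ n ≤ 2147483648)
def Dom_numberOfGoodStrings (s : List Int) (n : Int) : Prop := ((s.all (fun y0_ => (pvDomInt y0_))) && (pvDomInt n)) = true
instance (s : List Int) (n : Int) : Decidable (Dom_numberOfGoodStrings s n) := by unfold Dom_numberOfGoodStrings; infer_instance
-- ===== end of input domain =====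

-- B replaces A's carried, step-by-step doubled accumulator by a precomputed prefix-value
-- table and counts substrings grouped by length with a closed-form per-pair check
-- (alternative decomposition, not claimed faster).


-- ===== PORT A =====
-- loop body of A's inner 'for j in range(i, n)': state (number, value)
def pvStepA (s : List Int) (i : Int) (st : Int × Int) (j : Int) : Int × Int :=
  let value := if i == j then PySem.List.pyGetD s j 0 else st.2 * 2 + PySem.List.pyGetD s j 0
  (if value == j - i + 1 then st.1 + 1 else st.1, value)

def numberOfGoodStrings (s : List Int) (n : Int) : Int :=
  ((PySem.List.pyRange 0 n 1).foldl
    (fun (st : Int × Int) i => (((PySem.List.pyRange i n 1).foldl (pvStepA s i) st).1, 0))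
    (0, 0)).1

-- ===== PORT B =====
-- Source B: pref = [0]; for d in s[:n]: pref.append(pref[-1]*2 + d); then count by length L
-- with the pure check pref[i+L] - (pref[i] << L) == L.
def numberOfGoodStrings_alt (s : List Int) (n : Int) : Int :=
  let pref := (PySem.List.slice s none (some n)).foldl
    (fun pref d => pref ++ [PySem.List.pyGetD pref (-1) 0 * 2 + d]) ([0] : List Int)
  (PySem.List.pyRange 1 (n + 1) 1).foldl (fun total L =>
    (PySem.List.pyRange 0 (n - L + 1) 1).foldl (fun total i =>
      if PySem.List.pyGetD pref (i + L) 0 - (PySem.List.pyGetD pref i 0 <<< L.toNat) == L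
      then total + 1 else total) total) 0

-- ===== PRECONDITION & SPEC =====
-- Pre_ excludes exactly the inputs where Python A raises IndexError (s[j] with n > len(s)).
def Pre_numberOfGoodStrings (s : List Int) (n : Int) : Prop := n ≤ (s.length : Int)
instance (s : List Int) (n : Int) : Decidable (Pre_numberOfGoodStrings s n) := by
  unfold Pre_numberOfGoodStrings; infer_instance

def pvWitness_numberOfGoodStrings : List Int × Int := ([1, 0, 1, 1], 4)

def Spec_numberOfGoodStrings (s : List Int) (n : Int) (out : Int) : Prop := out = numberOfGoodStrings_alt s n
instance (s : List Int) (n : Int) (out : Int) : Decidable (Spec_numberOfGoodStrings s n out) := by unfold Spec_numberOfGoodStrings; infer_instance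

-- ===== CLAIM (what is proved, stated in full; the proofs are below) =====
def Claim_equal_numberOfGoodStrings : Prop := ∀ (s : List Int) (n : Int), Dom_numberOfGoodStrings s n → Pre_numberOfGoodStrings s n → Spec_numberOfGoodStrings s n (numberOfGoodStrings s n)

-- ===== LEMMAS AND PROOFS =====

-- mathematical prefix value: pvPref s k = value of the first k entries read as binary digits
def pvPref (s : List Int) : Nat → Int
  | 0 => 0
  | k + 1 => pvPref s k * 2 + s.getD k 0

-- indicator: substring s[i..j] is good
def pvGood (s : List Int) (i j : Nat) : Int :=
  if pvPref s (j + 1) - 2 ^ (j + 1 - i) * pvPref s i = (j : Int) - (i : Int) + 1 then 1 else 0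

lemma pvInnerA (s : List Int) (n : Int) (i : Nat) :
    ∀ (m : Nat), i < m → (m : Int) ≤ n → ∀ (t v : Int),
      (PySem.List.pyRange (i : Int) (m : Int) 1).foldl (pvStepA s i) (t, v)
        = (t + ∑ j ∈ Finset.Ico i m, pvGood s i j,
           pvPref s m - 2 ^ (m - i) * pvPref s i) := by
  intro m hm
  induction m, hm using Nat.le_induction with
  | base =>
    intro _ t v
    have h1 : ((i + 1 : Nat) : Int) = (i : Int) + 1 := by push_cast; ring
    rw [h1, PySem.List.pyRange_one_singleton]
    simp only [List.foldl_cons, List.foldl_nil, pvStepA, beq_self_eq_true, if_true]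
    have hval : pvPref s (i + 1) - 2 ^ (i + 1 - i) * pvPref s i = s.getD i 0 := by
      simp [pvPref]; ring
    have hg : PySem.List.pyGetD s (i : Int) 0 = s.getD i 0 := PySem.List.pyGetD_natCast s i 0
    simp only [hg]
    refine Prod.ext ?_ hval.symm
    show (if (s.getD i 0 == (i : Int) - i + 1) then t + 1 else t) = t + _
    rw [Finset.sum_Ico_succ_top (le_refl i), Finset.Ico_self, Finset.sum_empty, pvGood, ← hval]
    simp only [beq_iff_eq]
    split_ifs <;> ring
  | succ m hm ih =>
    intro hle t v
    have h1 : ((m + 1 : Nat) : Int) = (m : Int) + 1 := by push_cast; ring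
    rw [h1, PySem.List.pyRange_one_succ_right (by exact_mod_cast Nat.le_of_lt hm)]
    rw [List.foldl_append]
    rw [ih (by omega) t v]
    simp only [List.foldl_cons, List.foldl_nil, pvStepA]
    have hne : ((i : Int) == (m : Int)) = false := by
      simp; omega
    simp only [hne, if_false, Bool.false_eq_true]
    have hval2 : (pvPref s m - 2 ^ (m - i) * pvPref s i) * 2 + s.getD m 0
        = pvPref s (m + 1) - 2 ^ (m + 1 - i) * pvPref s i := by
      have he : m + 1 - i = (m - i) + 1 := by omega
      rw [he, pow_succ]
      simp [pvPref]; ring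
    have hg : PySem.List.pyGetD s (m : Int) 0 = s.getD m 0 := PySem.List.pyGetD_natCast s m 0
    simp only [hg]
    refine Prod.ext ?_ hval2
    show (if ((pvPref s m - 2 ^ (m - i) * pvPref s i) * 2 + s.getD m 0 == (m : Int) - i + 1)
          then t + (∑ j ∈ Finset.Ico i m, pvGood s i j) + 1
          else t + ∑ j ∈ Finset.Ico i m, pvGood s i j) = t + _
    rw [Finset.sum_Ico_succ_top (Nat.le_of_lt hm), hval2]
    simp only [beq_iff_eq, pvGood]
    split_ifs <;> ring

lemma pvListA (s : List Int) (n : Int) :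
    ∀ (L : List Int), (∀ i ∈ L, 0 ≤ i ∧ i < n) → ∀ (t v : Int),
      ((L.foldl (fun (st : Int × Int) i =>
          (((PySem.List.pyRange i n 1).foldl (pvStepA s i) st).1, 0)) (t, v)).1
        = t + (L.map (fun i => ∑ j ∈ Finset.Ico i.toNat n.toNat, pvGood s i.toNat j)).sum) := by
  intro L
  induction L with
  | nil => intro _ t v; simp
  | cons i L ih =>
    intro hmem t v
    obtain ⟨hi0, hin⟩ := hmem i (List.mem_cons_self)
    have hci : ((i.toNat : Nat) : Int) = i := Int.toNat_of_nonneg hi0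
    have hcn : ((n.toNat : Nat) : Int) = n := Int.toNat_of_nonneg (by omega)
    have hlt : i.toNat < n.toNat := by omega
    rw [List.foldl_cons]
    have hinner := pvInnerA s n i.toNat n.toNat hlt (by rw [hcn]) t v
    rw [hci, hcn] at hinner
    rw [hinner]
    rw [ih (fun x hx => hmem x (List.mem_cons_of_mem i hx))]
    simp [add_assoc]

lemma pvAeq (s : List Int) (n : Int) :
    numberOfGoodStrings s n
      = ∑ i ∈ Finset.range n.toNat, ∑ j ∈ Finset.Ico i n.toNat, pvGood s i j := by
  unfold numberOfGoodStrings
  rw [pvListA s n _ (fun i hi => by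
    rw [PySem.List.mem_pyRange_one] at hi; exact hi)]
  rw [PySem.List.pyRange_one, List.map_map]
  simp only [Int.sub_zero, zero_add]
  have : ∀ (f : ℕ → ℤ) (N : ℕ), ((List.range N).map f).sum = ∑ k ∈ Finset.range N, f k :=
    fun f N => rfl
  rw [this]
  refine Finset.sum_congr rfl (fun k _ => ?_)
  simp

-- B side: characterise the two table-building passes, then the counting pass.

lemma pvPref_append_le (ds : List Int) (d : Int) :
    ∀ k, k ≤ ds.length → pvPref (ds ++ [d]) k = pvPref ds k := by
  intro k
  induction k with
  | zero => intro _; rfl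
  | succ k ih =>
    intro hk
    simp only [pvPref]
    rw [ih (by omega)]
    have : (ds ++ [d]).getD k 0 = ds.getD k 0 := by
      simp [List.getD_eq_getElem?_getD, List.getElem?_append_left (by omega : k < ds.length)]
    rw [this]

lemma pvPref_append_last (ds : List Int) (d : Int) :
    pvPref (ds ++ [d]) (ds.length + 1) = pvPref ds ds.length * 2 + d := by
  simp only [pvPref]
  rw [pvPref_append_le ds d ds.length (le_refl _)]
  have : (ds ++ [d]).getD ds.length 0 = d := by
    simp [List.getD_eq_getElem?_getD]
  rw [this]

lemma pvBuildPref (ds : List Int) :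
    ds.foldl (fun p d => p ++ [PySem.List.pyGetD p (-1) 0 * 2 + d]) ([0] : List Int)
      = (List.range (ds.length + 1)).map (fun k => pvPref ds k) := by
  induction ds using List.reverseRecOn with
  | nil => simp [pvPref]
  | append_singleton ds d ih =>
    rw [List.foldl_append, ih, List.foldl_cons, List.foldl_nil]
    have hlast : PySem.List.pyGetD ((List.range (ds.length + 1)).map (fun k => pvPref ds k)) (-1) 0
        = pvPref ds ds.length := by
      rw [List.range_succ, List.map_append, List.map_cons, List.map_nil]
      exact PySem.List.pyGetD_neg_one_append_singleton _ _ _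
    rw [hlast]
    rw [show (ds ++ [d]).length + 1 = (ds.length + 1) + 1 by simp]
    rw [List.range_succ (n := ds.length + 1), List.map_append, List.map_cons, List.map_nil]
    congr 1
    · refine (List.map_congr_left (fun k hk => ?_)).symm
      rw [List.mem_range] at hk
      exact pvPref_append_le ds d k (by omega)
    · rw [pvPref_append_last ds d]

lemma pvPref_take (s : List Int) (N : Nat) :
    ∀ k, k ≤ N → pvPref (s.take N) k = pvPref s k := by
  intro k
  induction k with
  | zero => intro _; rfl
  | succ k ih =>
    intro hk
    simp only [pvPref]
    rw [ih (by omega)]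
    have : (s.take N).getD k 0 = s.getD k 0 := by
      simp [List.getD_eq_getElem?_getD, (by omega : k < N)]
    rw [this]

lemma pvInnerBcount (s : List Int) (N L : Nat) (hL1 : 1 ≤ L) (hLN : L ≤ N) (total : Int) :
    (PySem.List.pyRange 0 ((N : Int) - L + 1) 1).foldl
      (fun total i =>
        if PySem.List.pyGetD ((List.range (N + 1)).map (fun k => pvPref s k)) (i + L) 0
            - (PySem.List.pyGetD ((List.range (N + 1)).map (fun k => pvPref s k)) i 0 <<< L) == (L : Int)
        then total + 1 else total) total
      = total + ∑ i ∈ Finset.range (N + 1 - L), pvGood s i (i + L - 1) := by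
  rw [PySem.List.foldl_count_if]
  rw [show ((N : Int) - L + 1) = ((N + 1 - L : Nat) : Int) by omega]
  rw [PySem.List.pyRange_zero_nat (N + 1 - L)]
  rw [List.countP_map]
  rw [← PySem.List.sum_map_ite_one_zero]
  have hsum : ∀ (f : ℕ → ℤ) (M : ℕ), ((List.range M).map f).sum = ∑ k ∈ Finset.range M, f k :=
    fun f M => rfl
  rw [hsum]
  congr 1
  refine Finset.sum_congr rfl (fun i hi => ?_)
  rw [Finset.mem_range] at hi
  have h1 : ((i : Int) + L) = ((i + L : Nat) : Int) := by push_cast; ring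
  rw [Function.comp_apply, h1, PySem.List.pyGetD_natCast, PySem.List.pyGetD_natCast]
  rw [PySem.List.getD_map_range _ _ _ _ (by omega : i + L < N + 1)]
  rw [PySem.List.getD_map_range _ _ _ _ (by omega : i < N + 1)]
  rw [Int.shiftLeft_eq, mul_comm (pvPref s i) ((2:Int) ^ L), pvGood]
  have he1 : i + L - 1 + 1 = i + L := by omega
  have he2 : i + L - i = L := by omega
  have he3 : ((i + L - 1 : Nat) : Int) - (i : Nat) + 1 = (L : Int) := by omega
  rw [he1, he2, he3]
  simp only [beq_iff_eq]

lemma pvBeq (s : List Int) (n : Int) (h0 : 0 ≤ n) (hlen : n ≤ (s.length : Int)) :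
    numberOfGoodStrings_alt s n
      = ∑ L ∈ Finset.Ico 1 (n.toNat + 1),
          ∑ i ∈ Finset.range (n.toNat + 1 - L), pvGood s i (i + L - 1) := by
  have hn : ((n.toNat : Nat) : Int) = n := Int.toNat_of_nonneg h0
  simp only [numberOfGoodStrings_alt]
  rw [← hn, PySem.List.slice_to_natCast, pvBuildPref (s.take n.toNat)]
  have hlt : (s.take n.toNat).length = n.toNat := by
    rw [List.length_take]; omega
  rw [hlt]
  rw [show (List.range (n.toNat + 1)).map (fun k => pvPref (s.take n.toNat) k)
        = (List.range (n.toNat + 1)).map (fun k => pvPref s k) from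
      List.map_congr_left (fun k hk => pvPref_take s n.toNat k
        (by rw [List.mem_range] at hk; omega))]
  rw [PySem.List.foldl_congr_mem _ _
    (fun total L => total + ∑ i ∈ Finset.range (n.toNat + 1 - L.toNat),
      pvGood s i (i + L.toNat - 1)) _
    (by
      intro acc L hL
      rw [PySem.List.mem_pyRange_one] at hL
      have hL1 : 1 ≤ L.toNat := by omega
      have hLN : L.toNat ≤ n.toNat := by omega
      have hcL : ((L.toNat : Nat) : Int) = L := Int.toNat_of_nonneg (by omega)
      have h := pvInnerBcount s n.toNat L.toNat hL1 hLN acc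
      rw [hcL] at h
      exact h)]
  rw [PySem.List.foldl_add]
  rw [PySem.List.pyRange_one, List.map_map]
  have hsum : ∀ (f : ℕ → ℤ) (M : ℕ), ((List.range M).map f).sum = ∑ k ∈ Finset.range M, f k :=
    fun f M => rfl
  rw [hsum, Finset.sum_Ico_eq_sum_range]
  rw [show (↑n.toNat : Int) + 1 - 1 = (n.toNat : Int) by ring]
  rw [show ((n.toNat : Int)).toNat = n.toNat by omega]
  refine (zero_add _).trans (Finset.sum_congr rfl (fun k hk => ?_))
  simp only [Function.comp_apply]
  rw [show ((1 : Int) + k).toNat = 1 + k by omega]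

lemma pvReindex (s : List Int) (N : Nat) :
    ∑ i ∈ Finset.range N, ∑ j ∈ Finset.Ico i N, pvGood s i j
      = ∑ L ∈ Finset.Ico 1 (N + 1), ∑ i ∈ Finset.range (N + 1 - L), pvGood s i (i + L - 1) := by
  calc
    ∑ i ∈ Finset.range N, ∑ j ∈ Finset.Ico i N, pvGood s i j
        = ∑ j ∈ Finset.Ico 0 N, ∑ i ∈ Finset.Ico 0 (j + 1), pvGood s i j := by
          rw [Finset.range_eq_Ico, Finset.sum_Ico_Ico_comm]
    _ = ∑ j ∈ Finset.Ico 0 N, ∑ d ∈ Finset.Ico 0 (j + 1), pvGood s (j - d) j := by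
          refine Finset.sum_congr rfl (fun j _ => ?_)
          rw [← Finset.range_eq_Ico]
          have h := Finset.sum_range_reflect (fun i => pvGood s i j) (j + 1)
          simp only [Nat.add_sub_cancel] at h
          exact h.symm
    _ = ∑ d ∈ Finset.Ico 0 N, ∑ j ∈ Finset.Ico d N, pvGood s (j - d) j :=
          (Finset.sum_Ico_Ico_comm 0 N (fun d j => pvGood s (j - d) j)).symm
    _ = ∑ d ∈ Finset.range N, ∑ i ∈ Finset.range (N - d), pvGood s i (i + d) := by
          rw [← Finset.range_eq_Ico]
          refine Finset.sum_congr rfl (fun d _ => ?_)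
          rw [Finset.sum_Ico_eq_sum_range]
          refine Finset.sum_congr rfl (fun i _ => ?_)
          congr 1 <;> omega
    _ = ∑ L ∈ Finset.Ico 1 (N + 1), ∑ i ∈ Finset.range (N + 1 - L), pvGood s i (i + L - 1) := by
          rw [Finset.sum_Ico_eq_sum_range]
          simp only [Nat.add_sub_cancel]
          refine (Finset.sum_congr rfl (fun d _ => ?_)).symm
          rw [show N + 1 - (1 + d) = N - d by omega]
          refine Finset.sum_congr rfl (fun i _ => ?_)
          congr 1
          omega

-- ===== VERDICT (by name: the statement is the Claim_ definition above) =====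
theorem numberOfGoodStrings_spec : Claim_equal_numberOfGoodStrings := by
  intro s n _ hpre
  unfold Spec_numberOfGoodStrings
  by_cases h0 : 0 ≤ n
  · rw [pvAeq s n, pvBeq s n h0 hpre, pvReindex]
  · have hA : PySem.List.pyRange 0 n 1 = [] := PySem.List.pyRange_one_eq_nil (by omega)
    have hB : PySem.List.pyRange 1 (n + 1) 1 = [] := PySem.List.pyRange_one_eq_nil (by omega)
    simp only [numberOfGoodStrings, numberOfGoodStrings_alt, hA, hB, List.foldl_nil]
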